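-- pv_equiv track=rewrite | github.com/nermadie/CodeForces_Solutions | CodeforcesRound923Div3/prob02.py | solve
-- ===== SOURCE A (Python) =====
-- def solve(n, a):
--     alphabet = "abcdefghijklmnopqrstuvwxyz"
--     cur_alphabet = 0
--     dict_char = {}
--     result = []
--     for item in a:
--         if item == 0:
--             dict_char.setdefault(alphabet[cur_alphabet], 0)
--             dict_char[alphabet[cur_alphabet]] += 1
--             result.append(alphabet[cur_alphabet])
--             cur_alphabet += 1
--         else:
--             for k, v in dict_char.items():
--                 if v == item:
--                     dict_char[k] += 1
--                     result.append(k)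
--                     break
--     return "".join(result)
-- ===== SOURCE B (Python) =====
-- def solve(n, a):
--     # Bucket queues: for each count value, the letter indices currently at that
--     # count, in creation order (creation indices enter bucket 1 increasingly and
--     # move up monotonically, so the front of each queue is always the
--     # earliest-created letter with that count).
--     alphabet = "abcdefghijklmnopqrstuvwxyz"
--     buckets = {}
--     cur = 0
--     result = []
--     for item in a:
--         if item == 0:
--             c = alphabet[cur]
--             buckets.setdefault(1, []).append(cur)
--             cur += 1
--             result.append(c)
--         else:
--             q = buckets.get(item)
--             if q:
--                 idx = q.pop(0)
--                 buckets.setdefault(item + 1, []).append(idx)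
--                 result.append(alphabet[idx])
--     return "".join(result)
-- ===== Notes on version B (the rewrite author's own statement) =====
-- stated objective: alternative
-- what changed: Replaces the char->count dict scanned linearly for the first key with the given count by a dict of count->queue-of-letter-indices buckets, popping the front of the matching bucket (the earliest-created letter at that count, which the monotone bucket discipline keeps first) instead of scanning all created letters per item.
import Mathlib
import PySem

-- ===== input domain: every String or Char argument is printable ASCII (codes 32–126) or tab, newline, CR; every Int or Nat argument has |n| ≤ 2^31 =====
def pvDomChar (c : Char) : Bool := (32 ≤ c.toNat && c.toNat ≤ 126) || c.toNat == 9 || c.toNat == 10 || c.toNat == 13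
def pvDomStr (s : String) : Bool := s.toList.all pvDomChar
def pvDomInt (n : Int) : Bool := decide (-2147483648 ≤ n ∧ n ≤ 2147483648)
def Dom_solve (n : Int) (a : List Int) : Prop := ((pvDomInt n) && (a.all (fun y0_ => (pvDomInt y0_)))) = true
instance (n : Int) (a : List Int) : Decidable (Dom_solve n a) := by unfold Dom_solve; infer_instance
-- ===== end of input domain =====

-- B builds the string from count→queue-of-letter-indices buckets instead of scanning the
-- char→count dict; equivalence of the RETURN value is proved on inputs with at most 26 zeros
-- (on more, both Pythons raise IndexError).

-- shared trivial accessor: alphabet[i] (the ' ' default is never reached under Pre_)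
def solveAlphabet : List Char := "abcdefghijklmnopqrstuvwxyz".toList
def solveAlphaAt (i : Int) : Char := PySem.List.pyGetD solveAlphabet i ' '

-- ===== PORT A =====
-- the inner 'for k, v in dict_char.items(): if v == item: … break' scan
def solveInnerA : List (Char × Int) → Int → Option Char
  | [], _ => none
  | (k, v) :: t, item => if v == item then some k else solveInnerA t item

def solveStepA (st : Int × PySem.Dict Char Int × List Char) (item : Int) :
    Int × PySem.Dict Char Int × List Char :=
  let (cur, d, res) := st
  if item == 0 then
    let c := solveAlphaAt cur
    let d1 := d.setdefault c 0
    let d2 := d1.insert c (d1.getD c 0 + 1)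
    (cur + 1, d2, res ++ [c])
  else
    match solveInnerA d.items item with
    | some k => (cur, d.insert k (d.getD k 0 + 1), res ++ [k])
    | none => (cur, d, res)

def solve (n : Int) (a : List Int) : String :=
  String.mk (a.foldl solveStepA (0, PySem.Dict.empty, [])).2.2

-- ===== PORT B =====
def solveStepB (st : Int × PySem.Dict Int (List Int) × List Char) (item : Int) :
    Int × PySem.Dict Int (List Int) × List Char :=
  let (cur, b, res) := st
  if item == 0 then
    let c := solveAlphaAt cur
    let b1 := b.insert 1 (b.getD 1 [] ++ [cur])
    (cur + 1, b1, res ++ [c])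
  else
    match b.getD item [] with
    | [] => (cur, b, res)
    | idx :: q =>
      let b1 := b.insert item q
      let b2 := b1.insert (item + 1) (b1.getD (item + 1) [] ++ [idx])
      (cur, b2, res ++ [solveAlphaAt idx])

def solve_alt (n : Int) (a : List Int) : String :=
  String.mk (a.foldl solveStepB (0, PySem.Dict.empty, [])).2.2

-- ===== PRECONDITION & SPEC =====
-- Pre_ excludes exactly the inputs with more than 26 zeros, on which both Pythons raise
-- IndexError at the 27th zero (alphabet[26]).
def Pre_solve (n : Int) (a : List Int) : Prop := a.count 0 ≤ 26
instance (n : Int) (a : List Int) : Decidable (Pre_solve n a) := by unfold Pre_solve; infer_instance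
def pvWitness_solve : Int × List Int := (5, [0, 0, 1, 0, 1])

def Spec_solve (n : Int) (a : List Int) (out : String) : Prop := out = solve_alt n a
instance (n : Int) (a : List Int) (out : String) : Decidable (Spec_solve n a out) := by unfold Spec_solve; infer_instance

-- ===== CLAIM (what is proved, stated in full; the proofs are below) =====
def Claim_equal_solve : Prop := ∀ (n : Int) (a : List Int), Dom_solve n a → Pre_solve n a → Spec_solve n a (solve n a)

-- ===== LEMMAS AND PROOFS =====

-- injectivity of the alphabet accessor on the first 26 indices
theorem solveAlpha_inj : ∀ i : Nat, i < 26 → ∀ j : Nat, j < 26 →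
    solveAlphaAt i = solveAlphaAt j → i = j := by decide

theorem solveInnerA_map (l : List Nat) (cnt : Nat → Int) (v : Int) :
    solveInnerA (l.map (fun i : Nat => (solveAlphaAt i, cnt i))) v
      = ((l.filter (fun i : Nat => cnt i == v)).head?).map (fun i : Nat => solveAlphaAt i) := by
  induction l with
  | nil => simp [solveInnerA]
  | cons a t ih =>
    simp only [List.map_cons, solveInnerA, List.filter_cons]
    by_cases h : cnt a == v
    · simp [h]
    · simp [h, ih]


theorem solve_filter_or (P Q : Nat → Bool) (i0 : Nat) :
    ∀ l : List Nat, l.Pairwise (· < ·) → i0 ∈ l →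
    (∀ j ∈ l, Q j = (P j || j == i0)) →
    (∀ j ∈ l, P j = true → j < i0) → P i0 = false →
    l.filter Q = l.filter P ++ [i0] := by
  intro l
  induction l with
  | nil => simp
  | cons a t ih =>
    intro hpw hmem hQ hP hPi0
    rcases List.pairwise_cons.mp hpw with ⟨ha, hpt⟩
    by_cases hai : a = i0
    · subst hai
      have ht : ∀ j ∈ t, Q j = false := by
        intro j hj
        have := hQ j (List.mem_cons_of_mem _ hj)
        have hPj : P j = false := by
          by_contra hc
          have := hP j (List.mem_cons_of_mem _ hj) (by simpa using hc)
          exact absurd this (by have := ha j hj; omega)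
        rw [this, hPj]
        simp only [Bool.false_or, beq_eq_false_iff_ne]
        exact (ha j hj).ne'
      have hQa : Q a = true := by simpa [hPi0] using hQ a List.mem_cons_self
      rw [List.filter_cons_of_pos hQa, List.filter_cons_of_neg (by simp [hPi0]),
          List.filter_eq_nil_iff.mpr (fun j hj => by simp [ht j hj]),
          List.filter_eq_nil_iff.mpr (fun j hj => by
            intro hc; have := hP j (List.mem_cons_of_mem _ hj) (by simpa using hc)
            have := ha j hj; omega)]
      rfl
    · have hmem' : i0 ∈ t := by rcases List.mem_cons.mp hmem with h | h; exact absurd h.symm hai; exact h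
      have hQa : Q a = P a := by simp [hQ a List.mem_cons_self, hai]
      have := ih hpt hmem' (fun j hj => hQ j (List.mem_cons_of_mem _ hj))
        (fun j hj => hP j (List.mem_cons_of_mem _ hj)) hPi0
      by_cases hPa : P a = true
      · rw [List.filter_cons_of_pos (by simp [hQa, hPa]), List.filter_cons_of_pos hPa, this]
        rfl
      · rw [List.filter_cons_of_neg (by simp [hQa]; simpa using hPa),
            List.filter_cons_of_neg (by simpa using hPa), this]


-- coupling invariant between A's (cur, dict_char) and B's (cur, buckets)
def solveInv (cur : Nat) (cnt : Nat → Int) (d : PySem.Dict Char Int)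
    (b : PySem.Dict Int (List Int)) : Prop :=
  cur ≤ 26 ∧
  d.items = (List.range cur).map (fun i : Nat => (solveAlphaAt i, cnt i)) ∧
  (∀ i j, i ≤ j → j < cur → cnt j ≤ cnt i) ∧
  (∀ i, i < cur → 1 ≤ cnt i) ∧
  (∀ v : Int, b.getD v [] =
    ((List.range cur).filter (fun i : Nat => cnt i == v)).map (fun i : Nat => (i : Int)))

theorem solve_main : ∀ (a : List Int) (cur : Nat) (cnt : Nat → Int)
    (d : PySem.Dict Char Int) (b : PySem.Dict Int (List Int)) (res : List Char),
    solveInv cur cnt d b → cur + a.count 0 ≤ 26 →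
    (a.foldl solveStepA ((cur : Int), d, res)).2.2 =
    (a.foldl solveStepB ((cur : Int), b, res)).2.2 := by
  intro a
  induction a with
  | nil => intro _ _ _ _ _ _ _; rfl
  | cons item t ih =>
    intro cur cnt d b res hinv hcount
    obtain ⟨h26, hitems, hanti, hpos, hbuck⟩ := hinv
    have hkeys : d.keys = (List.range cur).map (fun i : Nat => solveAlphaAt i) := by
      simp only [PySem.Dict.keys, hitems, List.map_map]; rfl
    have hnodup : d.keys.Nodup := by
      rw [hkeys]
      refine List.Nodup.map_on ?_ List.nodup_range
      intro x hx y hy hxy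
      exact solveAlpha_inj x (by have := List.mem_range.mp hx; omega) y
        (by have := List.mem_range.mp hy; omega) hxy
    by_cases hz : item = 0
    · subst hz
      have hcur : cur < 26 := by
        rw [List.count_cons_self] at hcount; omega
      have hcont : d.contains (solveAlphaAt cur) = false := by
        rw [PySem.Dict.contains_eq_decide_mem_keys, hkeys]
        simp only [decide_eq_false_iff_not, List.mem_map]
        rintro ⟨i, hi, hieq⟩
        have := solveAlpha_inj i (by have := List.mem_range.mp hi; omega) cur hcur hieq
        have := List.mem_range.mp hi; omega
      have stepA : solveStepA ((cur : Int), d, res) 0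
          = ((cur : Int) + 1, d.insert (solveAlphaAt cur) 1, res ++ [solveAlphaAt cur]) := by
        simp only [solveStepA]
        have h00 : (((0:Int) == 0) = true) := rfl
        rw [if_pos h00]
        rw [PySem.Dict.setdefault_of_not_contains _ _ hcont]
        simp [PySem.Dict.getD_insert_self, PySem.Dict.insert_insert_self]
      have stepB : solveStepB ((cur : Int), b, res) 0
          = ((cur : Int) + 1, b.insert 1 (b.getD 1 [] ++ [(cur : Int)]),
             res ++ [solveAlphaAt cur]) := rfl
      rw [List.foldl_cons, List.foldl_cons, stepA, stepB]
      have hc1 : ((cur : Int) + 1) = (((cur + 1 : Nat)) : Int) := by push_cast; ring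
      rw [hc1]
      refine ih (cur + 1) (fun i => if i = cur then 1 else cnt i) _ _ _ ⟨by omega, ?_, ?_, ?_, ?_⟩
        (by rw [List.count_cons_self] at hcount; omega)
      · rw [PySem.Dict.items_insert_of_not_contains _ _ hcont, hitems, List.range_succ,
            List.map_append]
        dsimp only
        simp only [List.map_cons, List.map_nil]
        congr 1
        refine List.map_congr_left (fun i hi => ?_)
        have : i ≠ cur := by have := List.mem_range.mp hi; omega
        simp [this]
      · intro i j hij hj
        dsimp only
        by_cases hi' : i = cur
        · have hj' : j = cur := by omega
          simp [hi', hj']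
        · rw [if_neg hi']
          by_cases hj' : j = cur
          · rw [if_pos hj']; exact hpos i (by omega)
          · rw [if_neg hj']; exact hanti i j hij (by omega)
      · intro i hi
        dsimp only
        by_cases hi' : i = cur
        · simp [hi']
        · simp only [if_neg hi']; exact hpos i (by omega)
      · have hfilt : ∀ v : Int,
            List.filter (fun i : Nat => (if i = cur then (1:Int) else cnt i) == v)
              (List.range (cur + 1))
            = List.filter (fun i : Nat => cnt i == v) (List.range cur)
              ++ (if (1:Int) == v then [cur] else []) := by
          intro v
          rw [List.range_succ, List.filter_append]
          congr 1
          · refine List.filter_congr (fun i hi => ?_)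
            have : i ≠ cur := by have := List.mem_range.mp hi; omega
            simp [this]
          · simp [List.filter_cons]
        intro v
        by_cases hv : v = 1
        · subst hv
          rw [PySem.Dict.getD_insert_self, hbuck 1, hfilt 1]
          simp
        · rw [PySem.Dict.getD_insert_of_ne _ _ _ hv, hbuck v, hfilt v,
              if_neg (by simp; omega)]
          simp
    · -- item ≠ 0
      have hne : (item == (0:Int)) = false := by simpa using hz
      have hcnt0 : cur + List.count 0 t ≤ 26 := by
        rw [List.count_cons] at hcount
        simp [hz] at hcount; omega
      have hinner : solveInnerA d.items item
          = (((List.range cur).filter (fun i : Nat => cnt i == item)).head?).map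
              (fun i : Nat => solveAlphaAt i) := by
        rw [hitems, solveInnerA_map]
      rcases hfe : (List.range cur).filter (fun i : Nat => cnt i == item) with _ | ⟨i0, rest⟩
      · have stepA : solveStepA ((cur : Int), d, res) item = ((cur : Int), d, res) := by
          simp only [solveStepA]
          rw [if_neg (by simp [hne]), hinner, hfe]
          rfl
        have stepB : solveStepB ((cur : Int), b, res) item = ((cur : Int), b, res) := by
          simp only [solveStepB]
          rw [if_neg (by simp [hne]), hbuck item, hfe]
          rfl
        rw [List.foldl_cons, List.foldl_cons, stepA, stepB]
        exact ih cur cnt d b res ⟨h26, hitems, hanti, hpos, hbuck⟩ hcnt0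
      · have hi0mem : i0 ∈ (List.range cur).filter (fun i : Nat => cnt i == item) := by
          rw [hfe]; exact List.mem_cons_self
        have hi0r : i0 < cur := List.mem_range.mp (List.mem_of_mem_filter hi0mem)
        have hi0v : cnt i0 = item := by simpa using List.of_mem_filter hi0mem
        have hpwf : ((List.range cur).filter (fun i : Nat => cnt i == item)).Pairwise (· < ·) :=
          (List.pairwise_lt_range).filter _
        have hrest : ∀ x ∈ rest, i0 < x := by
          rw [hfe] at hpwf; exact (List.pairwise_cons.mp hpwf).1
        have hfirst : ∀ i, i < i0 → cnt i ≠ item := by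
          intro i hi hc
          have : i ∈ (i0 :: rest) := by
            rw [← hfe]; exact List.mem_filter.mpr ⟨List.mem_range.mpr (by omega), by simp [hc]⟩
          rcases List.mem_cons.mp this with h | h
          · omega
          · have := hrest i h; omega
        have hmemitems : (solveAlphaAt (i0 : Int), cnt i0) ∈ d.items := by
          rw [hitems]
          exact List.mem_map.mpr ⟨i0, List.mem_range.mpr hi0r, rfl⟩
        have hgetD : d.getD (solveAlphaAt (i0 : Int)) 0 = cnt i0 :=
          PySem.Dict.getD_of_mem_items _ hmemitems hnodup 0
        have hcontk : d.contains (solveAlphaAt (i0 : Int)) = true := by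
          rw [PySem.Dict.contains_iff_mem_keys, hkeys]
          exact List.mem_map.mpr ⟨i0, List.mem_range.mpr hi0r, rfl⟩
        have stepA : solveStepA ((cur : Int), d, res) item
            = ((cur : Int), d.insert (solveAlphaAt (i0 : Int)) (item + 1),
               res ++ [solveAlphaAt (i0 : Int)]) := by
          simp only [solveStepA]
          rw [if_neg (by simp [hne]), hinner, hfe]
          simp only [List.head?_cons, Option.map_some]
          rw [hgetD, hi0v]
        have hq : b.getD item [] = (i0 : Int) :: rest.map (fun i : Nat => (i : Int)) := by
          rw [hbuck item, hfe]; rfl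
        have hne1 : ((item + 1 : Int) ≠ item) := by omega
        have stepB : solveStepB ((cur : Int), b, res) item
            = ((cur : Int),
               (b.insert item (rest.map (fun i : Nat => (i : Int)))).insert (item + 1)
                 (b.getD (item + 1) [] ++ [(i0 : Int)]),
               res ++ [solveAlphaAt (i0 : Int)]) := by
          simp only [solveStepB]
          rw [if_neg (by simp [hne]), hq]
          dsimp only
          rw [PySem.Dict.getD_insert_of_ne _ _ _ hne1]
        rw [List.foldl_cons, List.foldl_cons, stepA, stepB]
        refine ih cur (fun i => if i = i0 then item + 1 else cnt i) _ _ _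
          ⟨h26, ?_, ?_, ?_, ?_⟩ hcnt0
        · rw [PySem.Dict.items_insert_of_contains _ _ hcontk, hitems, List.map_map]
          refine List.map_congr_left (fun i hi => ?_)
          have hir := List.mem_range.mp hi
          dsimp only [Function.comp]
          by_cases hii : i = i0
          · subst hii
            rw [if_pos (by simp), if_pos rfl]
          · rw [if_neg ?_, if_neg hii]
            intro hc
            exact hii (solveAlpha_inj i (by omega) i0 (by omega) (by simpa using hc))
        · intro i j hij hj
          dsimp only
          by_cases hj' : j = i0
          · by_cases hi' : i = i0
            · rw [if_pos hi', if_pos hj']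
            · rw [if_pos hj', if_neg hi']
              have h1 := hanti i i0 (by omega) hi0r
              have h2 := hfirst i (by omega)
              omega
          · rw [if_neg hj']
            by_cases hi' : i = i0
            · rw [if_pos hi']
              have := hanti i0 j (by omega) hj
              omega
            · rw [if_neg hi']; exact hanti i j hij hj
        · intro i hi
          dsimp only
          by_cases hi' : i = i0
          · rw [if_pos hi']
            have := hpos i0 hi0r; omega
          · rw [if_neg hi']; exact hpos i hi
        · intro v
          dsimp only
          have hor := solve_filter_or (fun i : Nat => cnt i == item + 1)
            (fun i : Nat => (if i = i0 then item + 1 else cnt i) == item + 1) i0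
            (List.range cur) List.pairwise_lt_range (List.mem_range.mpr hi0r)
            (fun j _ => by
              by_cases hji : j = i0
              · subst hji; simp [hi0v]
              · simp [hji])
            (fun j hj hPj => by
              simp only [beq_iff_eq] at hPj
              by_contra hc
              have := hanti i0 j (by omega) (List.mem_range.mp hj)
              omega)
            (by simp only [beq_eq_false_iff_ne, hi0v]; omega)
          by_cases hv1 : v = item + 1
          · subst hv1
            rw [PySem.Dict.getD_insert_self, hbuck (item + 1), hor, List.map_append]
            rfl
          · rw [PySem.Dict.getD_insert_of_ne _ _ _ hv1]
            by_cases hv2 : v = item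
            · rw [hv2, PySem.Dict.getD_insert_self]
              have hcg : (List.range cur).filter
                    (fun i : Nat => (if i = i0 then item + 1 else cnt i) == item)
                  = ((List.range cur).filter (fun i : Nat => cnt i == item)).filter
                      (fun i : Nat => decide ¬ (i = i0)) := by
                rw [List.filter_filter]
                refine List.filter_congr (fun i _ => ?_)
                by_cases hii : i = i0
                · rw [if_pos hii, hii]
                  have h1 : ((item + 1 : Int) == item) = false := by
                    simp only [beq_eq_false_iff_ne]; omega
                  simp [h1]
                · simp [hii]
              rw [hcg, hfe, List.filter_cons_of_neg (by simp),
                  List.filter_eq_self.mpr (fun x hx => by simp; exact (hrest x hx).ne')]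
            · rw [PySem.Dict.getD_insert_of_ne _ _ _ hv2, hbuck v]
              congr 1
              refine List.filter_congr (fun i _ => ?_)
              by_cases hii : i = i0
              · rw [if_pos hii, hii, hi0v]
                have h1 : ((item + 1 : Int) == v) = false := by
                  simp only [beq_eq_false_iff_ne]; omega
                have h2 : ((item : Int) == v) = false := by
                  simp only [beq_eq_false_iff_ne]; omega
                rw [h1, h2]
              · simp [hii]

-- ===== VERDICT (by name: the statement is the Claim_ definition above) =====
theorem solve_spec : Claim_equal_solve := by
  intro n a _ hpre
  unfold Spec_solve solve solve_alt
  have h := solve_main a 0 (fun _ => 0) PySem.Dict.empty PySem.Dict.empty []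
    (by constructor; · omega
        refine ⟨by simp [PySem.Dict.empty], fun i j _ _ => le_rfl, fun i h => by omega, ?_⟩
        intro v; simp [PySem.Dict.getD_empty])
    (by simpa using hpre)
  exact congrArg String.mk h
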